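-- pv_equiv track=rewrite | github.com/Gheavenfl/2017A2CS | Chapter25/recursion.py | countABC
-- ===== SOURCE A (Python) =====
-- def countABC(X):
--     a=len(X)
--     if a<3:
--         return 0
--     else:
--         if X[a-1]=='c' and X[a-2]=='b' and X[a-3]=='a':
--             return 1+countABC(X[:a-1])
--         elif X[a-1]=='a' and X[a-2]=='b' and X[a-3]=='a':
--             return 1+countABC(X[:a-1])
--         else:
--             return  countABC(X[:a-1])
-- ===== SOURCE B (Python) =====
-- def countABC(X):
--     count = 0
--     for t in zip(X, X[1:], X[2:]):
--         if t == ('a', 'b', 'c') or t == ('a', 'b', 'a'):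
--             count += 1
--     return count
-- ===== Notes on version B (the rewrite author's own statement) =====
-- stated objective: faster
-- what changed: Replaced A's end-to-front recursion that reslices the whole string at every step (quadratic copying, recursion as deep as the string) with a single forward pass over zip(X, X[1:], X[2:]) keeping a running counter.
import Mathlib
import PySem

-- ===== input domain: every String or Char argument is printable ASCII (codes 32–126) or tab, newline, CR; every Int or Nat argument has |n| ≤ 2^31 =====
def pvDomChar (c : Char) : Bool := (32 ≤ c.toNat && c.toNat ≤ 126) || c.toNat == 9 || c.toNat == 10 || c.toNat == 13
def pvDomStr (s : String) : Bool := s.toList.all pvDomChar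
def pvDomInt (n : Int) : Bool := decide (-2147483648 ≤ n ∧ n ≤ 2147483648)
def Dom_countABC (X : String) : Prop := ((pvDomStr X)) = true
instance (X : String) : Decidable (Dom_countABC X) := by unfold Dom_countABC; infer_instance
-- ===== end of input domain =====

-- B replaces A's end-to-front slicing recursion by one forward pass over zip(X, X[1:], X[2:]) with a running counter; same return value.

-- ===== PORT A =====
-- a = len(X) is inlined as PySem.List.len l at each use
def countA (l : List Char) : Int :=
  if _h : PySem.List.len l < 3 then 0
  else
    if PySem.List.pyGet? l (PySem.List.len l - 1) = some 'c' ∧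
       PySem.List.pyGet? l (PySem.List.len l - 2) = some 'b' ∧
       PySem.List.pyGet? l (PySem.List.len l - 3) = some 'a' then
      1 + countA (PySem.List.slice l none (some (PySem.List.len l - 1)))
    else if PySem.List.pyGet? l (PySem.List.len l - 1) = some 'a' ∧
            PySem.List.pyGet? l (PySem.List.len l - 2) = some 'b' ∧
            PySem.List.pyGet? l (PySem.List.len l - 3) = some 'a' then
      1 + countA (PySem.List.slice l none (some (PySem.List.len l - 1)))
    else
      countA (PySem.List.slice l none (some (PySem.List.len l - 1)))
termination_by l.length
decreasing_by
  all_goals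
    simp only [PySem.List.len_eq, not_lt] at _h
    rw [PySem.List.slice_to l (b := PySem.List.len l - 1)
      (by simp only [PySem.List.len_eq]; omega)]
    simp only [List.length_take, PySem.List.len_eq]
    omega

def countABC (X : String) : Int := countA X.toList

-- ===== PORT B =====
def countABC_alt (X : String) : Int :=
  (X.toList.zip ((PySem.List.slice X.toList (some 1) none).zip
      (PySem.List.slice X.toList (some 2) none))).foldl
    (fun count t => if t = ('a', 'b', 'c') ∨ t = ('a', 'b', 'a') then count + 1 else count) 0

-- ===== PRECONDITION & SPEC =====
def Spec_countABC (X : String) (out : Int) : Prop := out = countABC_alt X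
instance (X : String) (out : Int) : Decidable (Spec_countABC X out) := by unfold Spec_countABC; infer_instance

-- ===== CLAIM (what is proved, stated in full; the proofs are below) =====
def Claim_equal_countABC : Prop := ∀ (X : String), Dom_countABC X → Spec_countABC X (countABC X)

-- ===== LEMMAS AND PROOFS =====

/-- indicator of one three-character window -/
def ind (y z x : Char) : Int :=
  if (y, z, x) = ('a', 'b', 'c') ∨ (y, z, x) = ('a', 'b', 'a') then 1 else 0

/-- reference count of matching windows, consuming the list from the front -/
def cnt : List Char → Int
  | [] => 0
  | _ :: [] => 0
  | _ :: _ :: [] => 0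
  | y :: z :: x :: r => ind y z x + cnt (z :: x :: r)

lemma foldl_cnt (l : List Char) (n : Int) :
    (l.zip ((l.drop 1).zip (l.drop 2))).foldl
      (fun count t => if t = ('a', 'b', 'c') ∨ t = ('a', 'b', 'a') then count + 1 else count) n
    = n + cnt l := by
  induction l using cnt.induct generalizing n with
  | case1 => simp [cnt]
  | case2 _ => simp [cnt]
  | case3 _ _ => simp [cnt]
  | case4 y z x r ih =>
    show List.foldl _ _ ((y, (z, x)) :: (z :: x :: r).zip (((z :: x :: r).drop 1).zip ((z :: x :: r).drop 2))) = _
    simp only [List.foldl_cons, ih, cnt, ind]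
    split <;> ring

lemma cnt_snoc (l : List Char) (y z x : Char) :
    cnt (l ++ [y, z, x]) = cnt (l ++ [y, z]) + ind y z x := by
  induction l using cnt.induct with
  | case1 => simp [cnt]
  | case2 a => simp [cnt]
  | case3 a b => simp [cnt]; ring
  | case4 a b c r ih =>
    have h1 : cnt (a :: b :: c :: (r ++ [y, z, x])) = ind a b c + cnt ((b :: c :: r) ++ [y, z, x]) := rfl
    have h2 : cnt (a :: b :: c :: (r ++ [y, z])) = ind a b c + cnt ((b :: c :: r) ++ [y, z]) := rfl
    show cnt (a :: b :: c :: (r ++ [y, z, x])) = cnt (a :: b :: c :: (r ++ [y, z])) + ind y z x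
    rw [h1, h2, ih]; ring

lemma exists_snoc3 (l : List Char) (h : 3 ≤ l.length) :
    ∃ t y z x, l = t ++ [y, z, x] := by
  match hr : l.reverse with
  | x :: z :: y :: s =>
    refine ⟨s.reverse, y, z, x, ?_⟩
    have := congrArg List.reverse hr
    simpa using this
  | [] =>
    have hl := congrArg List.length hr
    simp only [List.length_reverse, List.length_nil] at hl
    omega
  | [_] =>
    have hl := congrArg List.length hr
    simp only [List.length_reverse, List.length_nil, List.length_cons] at hl
    omega
  | [_, _] =>
    have hl := congrArg List.length hr
    simp only [List.length_reverse, List.length_nil, List.length_cons] at hl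
    omega

lemma countA_snoc (t : List Char) (y z x : Char) :
    countA (t ++ [y, z, x]) = ind y z x + countA (t ++ [y, z]) := by
  have e1 : PySem.List.pyGet? (t ++ [y, z, x]) ((PySem.List.len (t ++ [y, z, x])) - 1) = some x := by
    have h' : (PySem.List.len (t ++ [y, z, x])) - 1 = (((t ++ [y, z]).length : Nat) : Int) := by
      simp only [PySem.List.len_eq, List.length_append, List.length_cons,
        List.length_nil]; push_cast; ring
    rw [h', show t ++ [y, z, x] = (t ++ [y, z]) ++ x :: [] by simp,
      PySem.List.pyGet?_append_length]
  have e2 : PySem.List.pyGet? (t ++ [y, z, x]) ((PySem.List.len (t ++ [y, z, x])) - 2) = some z := by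
    have h' : (PySem.List.len (t ++ [y, z, x])) - 2 = (((t ++ [y]).length : Nat) : Int) := by
      simp only [PySem.List.len_eq, List.length_append, List.length_cons,
        List.length_nil]; push_cast; ring
    rw [h', show t ++ [y, z, x] = (t ++ [y]) ++ z :: [x] by simp,
      PySem.List.pyGet?_append_length]
  have e3 : PySem.List.pyGet? (t ++ [y, z, x]) ((PySem.List.len (t ++ [y, z, x])) - 3) = some y := by
    have h' : (PySem.List.len (t ++ [y, z, x])) - 3 = ((t.length : Nat) : Int) := by
      simp only [PySem.List.len_eq, List.length_append, List.length_cons,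
        List.length_nil]; push_cast; ring
    rw [h', show t ++ [y, z, x] = t ++ y :: [z, x] by simp,
      PySem.List.pyGet?_append_length]
  have es : PySem.List.slice (t ++ [y, z, x]) none (some ((PySem.List.len (t ++ [y, z, x])) - 1)) = t ++ [y, z] := by
    rw [PySem.List.slice_to (t ++ [y, z, x]) (b := PySem.List.len (t ++ [y, z, x]) - 1)
      (by simp only [PySem.List.len_eq, List.length_append, List.length_cons, List.length_nil]; omega)]
    have hb : ((PySem.List.len (t ++ [y, z, x])) - 1).toNat = (t ++ [y, z]).length := by
      simp only [PySem.List.len_eq, List.length_append, List.length_cons, List.length_nil]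
      omega
    rw [hb, show t ++ [y, z, x] = (t ++ [y, z]) ++ [x] by simp]
    exact List.take_left' rfl
  rw [countA]
  rw [dif_neg (by
    simp only [PySem.List.len_eq, List.length_append, List.length_cons, List.length_nil, not_lt]
    omega)]
  rw [e1, e2, e3, es]
  simp only [Option.some.injEq]
  split_ifs with h1 h2
  · obtain ⟨rfl, rfl, rfl⟩ := h1
    norm_num [ind]
  · obtain ⟨rfl, rfl, rfl⟩ := h2
    norm_num [ind]
  · have : ind y z x = 0 := by
      simp only [ind, Prod.mk.injEq, ite_eq_right_iff]
      intro hc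
      rcases hc with ⟨hy, hz, hx⟩ | ⟨hy, hz, hx⟩
      · exact absurd ⟨hx, hz, hy⟩ h1
      · exact absurd ⟨hx, hz, hy⟩ h2
    rw [this]; ring

lemma countA_eq_cnt (l : List Char) : countA l = cnt l := by
  induction hn : l.length using Nat.strong_induction_on generalizing l with
  | _ n ih =>
  subst hn
  by_cases hlen : l.length < 3
  · rcases l with _ | ⟨a, _ | ⟨b, _ | ⟨c, r⟩⟩⟩
    · simp [countA, cnt]
    · simp [countA, cnt]
    · simp [countA, cnt]
    · simp only [List.length_cons] at hlen; omega
  · obtain ⟨t, y, z, x, rfl⟩ := exists_snoc3 l (by omega)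
    rw [countA_snoc, cnt_snoc,
      ih (t ++ [y, z]).length (by simp) (t ++ [y, z]) rfl]
    ring

-- ===== VERDICT (by name: the statement is the Claim_ definition above) =====
theorem countABC_spec : Claim_equal_countABC := by
  intro X _hdom
  unfold Spec_countABC countABC countABC_alt
  have e1 : PySem.List.slice X.toList (some 1) none = X.toList.drop 1 := by
    rw [PySem.List.slice_from X.toList (a := 1) (by norm_num)]; rfl
  have e2 : PySem.List.slice X.toList (some 2) none = X.toList.drop 2 := by
    rw [PySem.List.slice_from X.toList (a := 2) (by norm_num)]; rfl
  rw [e1, e2, foldl_cnt, countA_eq_cnt]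
  ring
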